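-- pv_equiv track=rewrite | github.com/minegishirei/psyguard_frontend | flask/code/main_qroq.py | contains_two_or_more_keywords
-- ===== SOURCE A (Python) =====
-- def contains_two_or_more_keywords(content, keywords, limit):
--     count = 0
--     hit_words = []
--     for keyword in keywords:
--         if keyword in content:
--             count += 1
--             hit_words.append(keyword)
--             if count >= limit:
--                 return True, hit_words
--     return False, hit_words
-- ===== SOURCE B (Python) =====
-- def contains_two_or_more_keywords(content, keywords, limit):
--     # Index the content once: collect every substring (window) of content whose
--     # length is some keyword length.  Each keyword test is then a hash lookup
--     # instead of a substring search over the content.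
--     windows = set()
--     for length in sorted({len(k) for k in keywords}):
--         for i in range(len(content) - length + 1):
--             windows.add(content[i:i + length])
--     hit_words = []
--     for keyword in keywords:
--         if keyword in windows:
--             hit_words.append(keyword)
--             if len(hit_words) >= limit:
--                 return True, hit_words
--     return False, hit_words
-- ===== Notes on version B (the rewrite author's own statement) =====
-- stated objective: faster
-- what changed: Replaces per-keyword substring search over the content by a one-time hash index of all content windows of the occurring keyword lengths, so each keyword test becomes a single set lookup instead of an O(N) scan.
import Mathlib
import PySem

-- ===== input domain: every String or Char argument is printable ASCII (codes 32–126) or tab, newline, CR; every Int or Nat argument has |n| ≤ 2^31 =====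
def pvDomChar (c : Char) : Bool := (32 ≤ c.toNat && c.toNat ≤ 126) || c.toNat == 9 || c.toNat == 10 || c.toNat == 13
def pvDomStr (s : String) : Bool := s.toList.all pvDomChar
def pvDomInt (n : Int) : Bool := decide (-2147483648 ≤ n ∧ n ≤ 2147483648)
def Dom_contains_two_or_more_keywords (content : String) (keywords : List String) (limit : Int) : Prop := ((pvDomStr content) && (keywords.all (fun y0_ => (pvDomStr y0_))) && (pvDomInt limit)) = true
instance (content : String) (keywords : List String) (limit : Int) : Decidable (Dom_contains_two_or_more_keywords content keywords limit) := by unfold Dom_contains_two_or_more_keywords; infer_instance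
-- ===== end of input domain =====

-- B indexes the content once (set of all windows of the occurring keyword lengths) and
-- tests each keyword by set lookup instead of a per-keyword substring search (objective: faster; measured).

-- ===== PORT A =====
-- A's for-loop over keywords with state (count, hit_words), early return when count >= limit.
def pvLoopA (content : String) (limit : Int) : List String → Int → List String → Bool × List String
  | [], _, acc => (false, acc)
  | k :: ks, count, acc =>
    if PySem.Str.isIn k content then
      if count + 1 ≥ limit then (true, acc ++ [k])
      else pvLoopA content limit ks (count + 1) (acc ++ [k])
    else pvLoopA content limit ks count acc

def contains_two_or_more_keywords (content : String) (keywords : List String) (limit : Int) : Bool × List String :=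
  pvLoopA content limit keywords 0 []

-- ===== PORT B =====
-- inner loop: for i in range(len(content) - length + 1): windows.add(content[i:i+length])
def pvAddWindows (content : String) (length : Int) (s : PySem.Set String) : PySem.Set String :=
  (PySem.List.pyRange 0 ((content.length : Int) - length + 1) 1).foldl
    (fun s i => PySem.Set.add s (PySem.Str.slice content (some i) (some (i + length)))) s

-- final loop: collect hits, early return at limit
def pvScanB (windows : PySem.Set String) (limit : Int) : List String → List String → Bool × List String
  | [], acc => (false, acc)
  | k :: ks, acc =>
    if PySem.Set.contains windows k then
      if ((acc ++ [k]).length : Int) ≥ limit then (true, acc ++ [k])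
      else pvScanB windows limit ks (acc ++ [k])
    else pvScanB windows limit ks acc

def contains_two_or_more_keywords_alt (content : String) (keywords : List String) (limit : Int) : Bool × List String :=
  let lengths := PySem.List.sorted (PySem.Set.ofList (keywords.map (fun k => (k.length : Int)))) (fun x => x) false
  let windows := lengths.foldl (fun s length => pvAddWindows content length s) PySem.Set.empty
  pvScanB windows limit keywords []

-- ===== PRECONDITION & SPEC =====
def Spec_contains_two_or_more_keywords (content : String) (keywords : List String) (limit : Int) (out : Bool × List String) : Prop := out = contains_two_or_more_keywords_alt content keywords limit
instance (content : String) (keywords : List String) (limit : Int) (out : Bool × List String) : Decidable (Spec_contains_two_or_more_keywords content keywords limit out) := by unfold Spec_contains_two_or_more_keywords; infer_instance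

-- ===== CLAIM (what is proved, stated in full; the proofs are below) =====
def Claim_equal_contains_two_or_more_keywords : Prop := ∀ (content : String) (keywords : List String) (limit : Int), Dom_contains_two_or_more_keywords content keywords limit → Spec_contains_two_or_more_keywords content keywords limit (contains_two_or_more_keywords content keywords limit)

-- ===== LEMMAS AND PROOFS =====

-- Membership in the window index: y is in the fold of pvAddWindows over lengths iff it was
-- already in s or equals a window content[i:i+L] for some L in lengths.
lemma pvMem_addWindows (content : String) (L : Int) (s : PySem.Set String) (y : String) :
    y ∈ pvAddWindows content L s ↔
      y ∈ s ∨ ∃ i ∈ PySem.List.pyRange 0 ((content.length : Int) - L + 1) 1,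
        y = PySem.Str.slice content (some i) (some (i + L)) := by
  unfold pvAddWindows
  exact PySem.Set.mem_foldl_add _ _ s y

lemma pvMem_windows (content : String) (lengths : List Int) (s : PySem.Set String) (y : String) :
    y ∈ lengths.foldl (fun s length => pvAddWindows content length s) s ↔
      y ∈ s ∨ ∃ L ∈ lengths, ∃ i ∈ PySem.List.pyRange 0 ((content.length : Int) - L + 1) 1,
        y = PySem.Str.slice content (some i) (some (i + L)) := by
  induction lengths generalizing s with
  | nil => simp
  | cons L Ls ih =>
    simp only [List.foldl_cons, ih, pvMem_addWindows, List.mem_cons]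
    constructor
    · rintro ((h | ⟨i, hi, hy⟩) | ⟨L', hL', h⟩)
      · exact Or.inl h
      · exact Or.inr ⟨L, Or.inl rfl, i, hi, hy⟩
      · exact Or.inr ⟨L', Or.inr hL', h⟩
    · rintro (h | ⟨L', (rfl | hL'), h⟩)
      · exact Or.inl (Or.inl h)
      · exact Or.inl (Or.inr h)
      · exact Or.inr ⟨L', hL', h⟩

-- A window of content (of a nonnegative length) is an infix of content.
lemma pvWindow_isIn (content k : String) (L i : Int) (hL : 0 ≤ L)
    (hi : i ∈ PySem.List.pyRange 0 ((content.length : Int) - L + 1) 1)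
    (hk : k = PySem.Str.slice content (some i) (some (i + L))) :
    PySem.Str.isIn k content = true := by
  rw [PySem.List.mem_pyRange_one] at hi
  obtain ⟨hi0, _⟩ := hi
  rw [PySem.Str.isIn_iff_infix]
  have : k.toList = (content.toList.drop i.toNat).take ((i + L).toNat - i.toNat) := by
    rw [hk, PySem.Str.toList_slice, PySem.Chars.slice_eq_listSlice,
        PySem.List.slice_toNat _ hi0 (by omega)]
  rw [this]
  exact List.infix_iff_prefix_suffix.mpr
    ⟨_, List.take_prefix _ _, List.drop_suffix _ _⟩

-- Conversely, if k occurs in content and its length is one of the indexed lengths,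
-- then k is one of the windows.
lemma pvIsIn_window (content k : String) (hin : PySem.Str.isIn k content = true) :
    ∃ i ∈ PySem.List.pyRange 0 ((content.length : Int) - (k.length : Int) + 1) 1,
      k = PySem.Str.slice content (some i) (some (i + (k.length : Int))) := by
  rw [PySem.Str.isIn_iff_infix] at hin
  obtain ⟨j, hpre⟩ := (PySem.Chars.exists_prefix_drop_iff_isIn k.toList content.toList).mpr
    (by rw [PySem.Chars.isIn_iff_infix]; exact hin)
  have hpre' : k.toList <+: content.toList.drop (min j content.toList.length) := by
    rcases le_total j content.toList.length with h | h
    · rw [min_eq_left h]; exact hpre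
    · have hd : content.toList.drop j = [] := List.drop_eq_nil_of_le h
      rw [hd] at hpre
      have hknil : k.toList = [] := List.prefix_nil.mp hpre
      simp [hknil]
  set j' := min j content.toList.length with hj'
  have hj'le : j' ≤ content.toList.length := min_le_right _ _
  have hlen : k.toList.length ≤ (content.toList.drop j').length := hpre'.length_le
  rw [List.length_drop] at hlen
  have hklen : k.toList.length = k.length := by simp
  have hclen : content.toList.length = content.length := by simp
  refine ⟨(j' : Int), ?_, ?_⟩
  · rw [PySem.List.mem_pyRange_one]
    refine ⟨Int.natCast_nonneg j', ?_⟩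
    omega
  · apply String.toList_inj.mp
    rw [PySem.Str.toList_slice, PySem.Chars.slice_eq_listSlice]
    have hcast : (j' : Int) + (k.length : Int) = ((j' + k.length : Nat) : Int) := by push_cast; ring
    rw [hcast, PySem.List.slice_natCast]
    have htake : (content.toList.drop j').take k.toList.length = k.toList :=
      (List.prefix_iff_eq_take.mp hpre').symm
    have : j' + k.length - j' = k.toList.length := by omega
    rw [this, htake]

-- For every keyword, the set lookup in B's index agrees with A's substring test.
lemma pvTest_eq (content : String) (keywords : List String) (k : String) (hk : k ∈ keywords) :
    PySem.Set.contains
      ((PySem.List.sorted (PySem.Set.ofList (keywords.map (fun k => (k.length : Int)))) (fun x => x) false).foldl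
        (fun s length => pvAddWindows content length s) PySem.Set.empty) k
      = PySem.Str.isIn k content := by
  set lengths := PySem.List.sorted (PySem.Set.ofList (keywords.map (fun k => (k.length : Int)))) (fun x => x) false with hlengths
  have hmemL : (k.length : Int) ∈ lengths := by
    rw [hlengths, PySem.List.mem_sorted, PySem.Set.mem_ofList]
    exact List.mem_map.mpr ⟨k, hk, rfl⟩
  have hposL : ∀ L ∈ lengths, (0 : Int) ≤ L := by
    intro L hL
    rw [hlengths, PySem.List.mem_sorted, PySem.Set.mem_ofList, List.mem_map] at hL
    obtain ⟨k', _, rfl⟩ := hL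
    exact Int.natCast_nonneg _
  by_cases hin : PySem.Str.isIn k content = true
  · rw [hin]
    rw [PySem.Set.contains_iff, pvMem_windows]
    obtain ⟨i, hi, hk'⟩ := pvIsIn_window content k hin
    exact Or.inr ⟨_, hmemL, i, hi, hk'⟩
  · rw [Bool.not_eq_true] at hin
    rw [hin, Bool.eq_false_iff, Ne, PySem.Set.contains_iff, pvMem_windows]
    rintro (h | ⟨L, hL, i, hi, hk'⟩)
    · simp [PySem.Set.empty] at h
    · have := pvWindow_isIn content k L i (hposL L hL) hi hk'
      rw [this] at hin
      exact Bool.noConfusion hin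

-- A's loop and B's scan agree when the membership tests agree on all remaining keywords.
lemma pvLoop_eq (content : String) (windows : PySem.Set String) (limit : Int)
    (ks : List String) (acc : List String)
    (htest : ∀ k ∈ ks, PySem.Set.contains windows k = PySem.Str.isIn k content) :
    pvLoopA content limit ks (acc.length : Int) acc = pvScanB windows limit ks acc := by
  induction ks generalizing acc with
  | nil => rfl
  | cons k ks ih =>
    have hk := htest k (List.mem_cons_self ..)
    have hks : ∀ k' ∈ ks, PySem.Set.contains windows k' = PySem.Str.isIn k' content :=
      fun k' h => htest k' (List.mem_cons_of_mem _ h)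
    simp only [pvLoopA, pvScanB, hk]
    by_cases hkin : PySem.Str.isIn k content
    · simp only [hkin, if_true]
      have hlen : ((acc ++ [k]).length : Int) = (acc.length : Int) + 1 := by
        simp
      rw [hlen]
      by_cases hl : (acc.length : Int) + 1 ≥ limit
      · rw [if_pos hl, if_pos hl]
      · rw [if_neg hl, if_neg hl]
        have := ih (acc ++ [k]) hks
        rwa [hlen] at this
    · simp only [hkin]
      exact ih acc hks

-- ===== VERDICT (by name: the statement is the Claim_ definition above) =====
theorem contains_two_or_more_keywords_spec : Claim_equal_contains_two_or_more_keywords := by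
  intro content keywords limit _
  unfold Spec_contains_two_or_more_keywords contains_two_or_more_keywords contains_two_or_more_keywords_alt
  have h := pvLoop_eq content _ limit keywords [] (fun k hk => pvTest_eq content keywords k hk)
  simpa using h
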